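-- pv_equiv track=rewrite | github.com/ava-orange-education/Ultimate-FinGPT-for-Financial-Analysis | Chapter_3/Scripts/Clean_data.py | handle_ambiguity
-- ===== SOURCE A (Python) =====
-- def handle_ambiguity(text):
--     ambiguous_terms = {
--         'bullish': 'positive market sentiment',
--         'bearish': 'negative market sentiment',
--         'volatile': 'unstable market'
--     }
--     for term, replacement in ambiguous_terms.items():
--         text = text.replace(term, replacement)
--     return text
-- ===== SOURCE B (Python) =====
-- def handle_ambiguity(text):
--     mapping = {
--         'bullish': 'positive market sentiment',
--         'bearish': 'negative market sentiment',
--         'volatile': 'unstable market'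
--     }
--     out = []
--     i = 0
--     n = len(text)
--     while i < n:
--         if text.startswith('bullish', i):
--             out.append(mapping['bullish'])
--             i += 7
--         elif text.startswith('bearish', i):
--             out.append(mapping['bearish'])
--             i += 7
--         elif text.startswith('volatile', i):
--             out.append(mapping['volatile'])
--             i += 8
--         else:
--             out.append(text[i])
--             i += 1
--     return ''.join(out)
-- ===== Notes on version B (the rewrite author's own statement) =====
-- stated objective: alternative
-- what changed: Replaces three independent full-text str.replace passes by a single left-to-right scan that at each position matches one of the three terms and emits its replacement (valid because no replacement contains or overlaps a term and no term overlaps another).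
import Mathlib
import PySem

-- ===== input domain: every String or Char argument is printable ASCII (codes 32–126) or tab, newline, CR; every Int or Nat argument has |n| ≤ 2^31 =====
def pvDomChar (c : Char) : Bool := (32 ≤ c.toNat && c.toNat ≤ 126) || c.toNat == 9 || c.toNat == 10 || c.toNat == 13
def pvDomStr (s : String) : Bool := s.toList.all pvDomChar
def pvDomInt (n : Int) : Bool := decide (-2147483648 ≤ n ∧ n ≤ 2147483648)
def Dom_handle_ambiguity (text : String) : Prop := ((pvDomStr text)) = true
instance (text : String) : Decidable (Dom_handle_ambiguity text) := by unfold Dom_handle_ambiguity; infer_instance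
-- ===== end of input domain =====

-- B replaces A's three independent full-text replace passes by a single left-to-right scan
-- that matches one of the three terms at each position (alternative decomposition, same result).

-- ===== PORT A =====
def handle_ambiguity (text : String) : String :=
  let ambiguous_terms : PySem.Dict String String := PySem.Dict.ofList
    [("bullish", "positive market sentiment"),
     ("bearish", "negative market sentiment"),
     ("volatile", "unstable market")]
  (PySem.Dict.items ambiguous_terms).foldl
    (fun t p => PySem.Str.replace t p.1 p.2) text

-- ===== PORT B =====
-- single left-to-right scan over the characters (Source B's while loop; the if/elif chain is Source B's)
def pvScanB : List Char → List Char
  | [] => []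
  | c :: t =>
    if ("bullish".toList).isPrefixOf (c :: t) then
      "positive market sentiment".toList ++ pvScanB (List.drop 7 (c :: t))
    else if ("bearish".toList).isPrefixOf (c :: t) then
      "negative market sentiment".toList ++ pvScanB (List.drop 7 (c :: t))
    else if ("volatile".toList).isPrefixOf (c :: t) then
      "unstable market".toList ++ pvScanB (List.drop 8 (c :: t))
    else c :: pvScanB t
termination_by s => s.length
decreasing_by all_goals (simp only [List.length_drop, List.length_cons]; omega)

def handle_ambiguity_alt (text : String) : String :=
  String.ofList (pvScanB text.toList)

-- ===== PRECONDITION & SPEC =====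
def Spec_handle_ambiguity (text : String) (out : String) : Prop := out = handle_ambiguity_alt text
instance (text : String) (out : String) : Decidable (Spec_handle_ambiguity text out) := by unfold Spec_handle_ambiguity; infer_instance

-- ===== CLAIM (what is proved, stated in full; the proofs are below) =====
def Claim_equal_handle_ambiguity : Prop := ∀ (text : String), Dom_handle_ambiguity text → Spec_handle_ambiguity text (handle_ambiguity text)

-- ===== LEMMAS AND PROOFS =====

-- generic table-driven scanner (proof-side model of pvScanB), with fuel
def pvScanF (ts : List (List Char × List Char)) : Nat → List Char → List Char
  | _, [] => []
  | 0, l => l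
  | fuel+1, c :: t =>
    match List.find? (fun p => p.1.isPrefixOf (c :: t)) ts with
    | some p => p.2 ++ pvScanF ts fuel (List.drop p.1.length (c :: t))
    | none => c :: pvScanF ts fuel t

def pvScan (ts : List (List Char × List Char)) (s : List Char) : List Char :=
  pvScanF ts s.length s

def pvNE (ts : List (List Char × List Char)) : Prop := ∀ p ∈ ts, p.1 ≠ ([] : List Char)

-- u and v are prefix-incomparable
def pvIncomp (u v : List Char) : Prop := ¬ u <+: v ∧ ¬ v <+: u

-- scanning for term t walks over a unchanged, whatever follows
def pvPasses (a t : List Char) : Prop := ∀ u ∈ a.tails, u ≠ [] → pvIncomp u t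

theorem pvScanF_irrel (ts : List (List Char × List Char)) (hne : pvNE ts) :
    ∀ (fuel₁ fuel₂ : Nat) (s : List Char), s.length ≤ fuel₁ → s.length ≤ fuel₂ →
      pvScanF ts fuel₁ s = pvScanF ts fuel₂ s := by
  intro fuel₁
  induction fuel₁ with
  | zero =>
    intro fuel₂ s h1 _
    have : s = [] := List.length_eq_zero_iff.mp (Nat.le_zero.mp h1)
    subst this; cases fuel₂ <;> rfl
  | succ f ih =>
    intro fuel₂ s h1 h2
    cases s with
    | nil => cases fuel₂ <;> rfl
    | cons c t =>
      cases fuel₂ with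
      | zero => simp at h2
      | succ f2 =>
        simp only [pvScanF]
        cases hf : List.find? (fun p => p.1.isPrefixOf (c :: t)) ts with
        | some q =>
          have hq1 : q.1 ≠ [] := hne q (List.mem_of_find?_eq_some hf)
          have hlen : (List.drop q.1.length (c :: t)).length ≤ f ∧
              (List.drop q.1.length (c :: t)).length ≤ f2 := by
            have : 1 ≤ q.1.length := List.length_pos_iff.mpr hq1
            simp only [List.length_drop, List.length_cons] at *
            omega
          simp [ih f2 _ hlen.1 hlen.2]
        | none =>
          have ht : t.length ≤ f ∧ t.length ≤ f2 := by
            simp only [List.length_cons] at h1 h2; omega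
          simp [ih f2 t ht.1 ht.2]

theorem pvScan_cons_some (ts : List (List Char × List Char)) (hne : pvNE ts)
    (c : Char) (t : List Char) (q : List Char × List Char)
    (hf : List.find? (fun p => p.1.isPrefixOf (c :: t)) ts = some q) :
    pvScan ts (c :: t) = q.2 ++ pvScan ts (List.drop q.1.length (c :: t)) := by
  have hq1 : q.1 ≠ [] := hne q (List.mem_of_find?_eq_some hf)
  have h1 : 1 ≤ q.1.length := List.length_pos_iff.mpr hq1
  unfold pvScan
  simp only [List.length_cons, pvScanF, hf]
  congr 1
  exact pvScanF_irrel ts hne t.length _ _ (by simp; omega) le_rfl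

theorem pvScan_cons_none (ts : List (List Char × List Char)) (_hne : pvNE ts)
    (c : Char) (t : List Char)
    (hf : List.find? (fun p => p.1.isPrefixOf (c :: t)) ts = none) :
    pvScan ts (c :: t) = c :: pvScan ts t := by
  unfold pvScan
  simp only [List.length_cons, pvScanF, hf]

theorem pvScan_single_match (qt qr : List Char) (hqt : qt ≠ []) (s : List Char)
    (hq : qt <+: s) :
    pvScan [(qt, qr)] s = qr ++ pvScan [(qt, qr)] (List.drop qt.length s) := by
  have hneq : pvNE [(qt, qr)] := by intro p hp; simp at hp; subst hp; exact hqt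
  cases s with
  | nil => exact absurd (List.prefix_nil.mp hq) hqt
  | cons c t =>
    exact pvScan_cons_some [(qt, qr)] hneq c t (qt, qr)
      (by simp [List.find?, List.isPrefixOf_iff_prefix.mpr hq])

-- L1: the scanner passes over a block it cannot match into
theorem pvScan_append (ts : List (List Char × List Char)) (hne : pvNE ts) :
    ∀ (a b : List Char), (∀ p ∈ ts, pvPasses a p.1) →
      pvScan ts (a ++ b) = a ++ pvScan ts b := by
  intro a
  induction a with
  | nil => intro b _; rfl
  | cons c a' ih =>
    intro b hp
    have hf : List.find? (fun p => p.1.isPrefixOf (c :: (a' ++ b))) ts = none := by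
      cases hf : List.find? (fun p => p.1.isPrefixOf (c :: (a' ++ b))) ts with
      | none => rfl
      | some q =>
        exfalso
        have hmem := List.mem_of_find?_eq_some hf
        have hpre : q.1 <+: (c :: a') ++ b := by
          have := List.find?_some hf
          simpa [List.isPrefixOf_iff_prefix] using this
        have hinc : pvIncomp (c :: a') q.1 :=
          hp q hmem (c :: a') ((List.mem_tails _ _).mpr (List.suffix_refl _)) (by simp)
        rcases List.prefix_or_prefix_of_prefix hpre (List.prefix_append _ _) with h | h
        · exact hinc.2 h
        · exact hinc.1 h
    rw [show (c :: a') ++ b = c :: (a' ++ b) by simp,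
        pvScan_cons_none ts hne _ _ hf,
        ih b (by
          intro p hpmem u hu hune
          exact hp p hpmem u ((List.mem_tails _ _).mpr
            (((List.mem_tails _ _).mp hu).trans (List.suffix_cons c a'))) hune)]
    simp

-- L2: the scanner cannot create a (partial) occurrence of qt that was not there
theorem pvScan_no_create (ts : List (List Char × List Char)) (hne : pvNE ts)
    (qt : List Char)
    (hC1 : ∀ p ∈ ts, ∀ u ∈ qt.tails, u ≠ [] → pvIncomp u p.2) :
    ∀ (s p : List Char), p ≠ [] → p <:+ qt → ¬ p <+: s → ¬ p <+: pvScan ts s := by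
  intro s
  induction hn : s.length using Nat.strong_induction_on generalizing s with
  | _ n ih =>
  intro p hpne hpsuf hnps
  cases s with
  | nil => intro h; exact hpne (List.prefix_nil.mp h)
  | cons c t =>
    cases hf : List.find? (fun p => p.1.isPrefixOf (c :: t)) ts with
    | some q =>
      rw [pvScan_cons_some ts hne c t q hf]
      intro h
      have hinc : pvIncomp p q.2 :=
        hC1 q (List.mem_of_find?_eq_some hf) p ((List.mem_tails _ _).mpr hpsuf) hpne
      rcases List.prefix_or_prefix_of_prefix h (List.prefix_append _ _) with h' | h'
      · exact hinc.1 h'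
      · exact hinc.2 h'
    | none =>
      rw [pvScan_cons_none ts hne c t hf]
      intro h
      cases p with
      | nil => exact hpne rfl
      | cons d p' =>
        rw [List.cons_prefix_cons] at h
        obtain ⟨hdc, hp'⟩ := h
        subst hdc
        by_cases hp'e : p' = []
        · subst hp'e
          exact hnps (by simp)
        · have hnp' : ¬ p' <+: t := fun hc => hnps (List.cons_prefix_cons.mpr ⟨rfl, hc⟩)
          have hsuf' : p' <:+ qt := (List.suffix_cons d p').trans hpsuf
          exact ih t.length (by simp [← hn]) t rfl p' hp'e hsuf' hnp' hp'

-- F: fusing one more term into the scanner table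
theorem pvScan_fuse (ts : List (List Char × List Char)) (hne : pvNE ts)
    (qt qr : List Char) (hqt : qt ≠ [])
    (hC1 : ∀ p ∈ ts, ∀ u ∈ qt.tails, u ≠ [] → pvIncomp u p.2)
    (hC2 : ∀ p ∈ ts, pvPasses p.2 qt)
    (hC3 : ∀ p ∈ ts, pvPasses qt p.1) :
    ∀ (s : List Char), pvScan [(qt, qr)] (pvScan ts s) = pvScan (ts ++ [(qt, qr)]) s := by
  have hne' : pvNE (ts ++ [(qt, qr)]) := by
    intro p hp
    rcases List.mem_append.mp hp with h | h
    · exact hne p h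
    · simp at h; subst h; exact hqt
  have hneq : pvNE [(qt, qr)] := by intro p hp; simp at hp; subst hp; exact hqt
  intro s
  induction hn : s.length using Nat.strong_induction_on generalizing s with
  | _ n ih =>
  cases s with
  | nil => rfl
  | cons c t =>
    cases hf : List.find? (fun p => p.1.isPrefixOf (c :: t)) ts with
    | some q =>
      have hq1 : q.1 ≠ [] := hne q (List.mem_of_find?_eq_some hf)
      have h1 : 1 ≤ q.1.length := List.length_pos_iff.mpr hq1
      rw [pvScan_cons_some ts hne c t q hf,
          pvScan_append [(qt, qr)] hneq q.2 _ (by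
            intro p hp; simp at hp; subst hp
            exact hC2 q (List.mem_of_find?_eq_some hf)),
          ih (List.drop q.1.length (c :: t)).length (by simp [← hn]; omega) _ rfl,
          pvScan_cons_some (ts ++ [(qt, qr)]) hne' c t q (by
            rw [List.find?_append, hf]; rfl)]
    | none =>
      by_cases hq : qt <+: (c :: t)
      · -- qt matches here; no ts-term does
        have hsplit : qt ++ List.drop qt.length (c :: t) = c :: t :=
          List.prefix_iff_eq_append.mp hq
        have h1 : 1 ≤ qt.length := List.length_pos_iff.mpr hqt
        calc pvScan [(qt, qr)] (pvScan ts (c :: t))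
            = pvScan [(qt, qr)] (pvScan ts (qt ++ List.drop qt.length (c :: t))) := by rw [hsplit]
          _ = pvScan [(qt, qr)] (qt ++ pvScan ts (List.drop qt.length (c :: t))) := by
              rw [pvScan_append ts hne qt _ (fun p hp => hC3 p hp)]
          _ = qr ++ pvScan [(qt, qr)] (pvScan ts (List.drop qt.length (c :: t))) := by
              rw [pvScan_single_match qt qr hqt _ (List.prefix_append _ _), List.drop_left]
          _ = qr ++ pvScan (ts ++ [(qt, qr)]) (List.drop qt.length (c :: t)) := by
              rw [ih (List.drop qt.length (c :: t)).length (by simp [← hn]; omega) _ rfl]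
          _ = pvScan (ts ++ [(qt, qr)]) (c :: t) := by
              rw [pvScan_cons_some (ts ++ [(qt, qr)]) hne' c t (qt, qr) (by
                rw [List.find?_append, hf]
                simp [List.find?, List.isPrefixOf_iff_prefix.mpr hq])]
      · -- nothing matches here
        have hnot : ¬ qt <+: pvScan ts (c :: t) :=
          pvScan_no_create ts hne qt hC1 (c :: t) qt hqt (List.suffix_refl _) hq
        rw [pvScan_cons_none ts hne c t hf]
        rw [pvScan_cons_none ts hne c t hf] at hnot
        have hb : qt.isPrefixOf (c :: pvScan ts t) = false := by
          cases hb : qt.isPrefixOf (c :: pvScan ts t) with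
          | false => rfl
          | true => exact absurd (List.isPrefixOf_iff_prefix.mp hb) hnot
        have hb' : qt.isPrefixOf (c :: t) = false := by
          cases hb' : qt.isPrefixOf (c :: t) with
          | false => rfl
          | true => exact absurd (List.isPrefixOf_iff_prefix.mp hb') hq
        have hfq : List.find? (fun p => p.1.isPrefixOf (c :: pvScan ts t)) [(qt, qr)] = none := by
          simp [List.find?, hb]
        rw [pvScan_cons_none [(qt, qr)] hneq c _ hfq,
            ih t.length (by simp [← hn]) t rfl,
            pvScan_cons_none (ts ++ [(qt, qr)]) hne' c t (by
              rw [List.find?_append, hf]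
              simp [List.find?, hb'])]

-- str.replace is the singleton-table scanner
theorem pvReplace_go_eq (old new : List Char) (hne : old ≠ []) :
    ∀ (fuel : Nat) (l acc : List Char), l.length ≤ fuel →
      PySem.Chars.replace.go old new fuel l acc = acc.reverse ++ pvScan [(old, new)] l := by
  intro fuel
  induction fuel with
  | zero =>
    intro l acc h
    have : l = [] := List.length_eq_zero_iff.mp (Nat.le_zero.mp h)
    subst this; simp [PySem.Chars.replace.go, pvScan, pvScanF]
  | succ f ih =>
    intro l acc h
    cases l with
    | nil => simp [PySem.Chars.replace.go, pvScan, pvScanF]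
    | cons c t =>
      have h1 : 1 ≤ old.length := List.length_pos_iff.mpr hne
      have hneS : pvNE [(old, new)] := by intro p hp; simp at hp; subst hp; exact hne
      by_cases hp : old.isPrefixOf (c :: t) = true
      · simp only [PySem.Chars.replace.go, if_pos hp]
        rw [ih _ _ (by simp at h ⊢; omega),
            pvScan_cons_some [(old, new)] hneS c t (old, new) (by simp [List.find?, hp])]
        simp
      · simp only [PySem.Chars.replace.go, if_neg hp]
        rw [ih _ _ (by simp at h ⊢; omega),
            pvScan_cons_none [(old, new)] hneS c t (by simp [List.find?, hp])]
        simp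

theorem pvReplace_eq (s old new : List Char) (hne : old ≠ []) :
    PySem.Chars.replace s old new = pvScan [(old, new)] s := by
  unfold PySem.Chars.replace
  rw [if_neg (by simp [hne])]
  simpa using pvReplace_go_eq old new hne s.length s [] le_rfl

-- the literal table of B's scanner
def pvT3 : List (List Char × List Char) :=
  [("bullish".toList, "positive market sentiment".toList),
   ("bearish".toList, "negative market sentiment".toList),
   ("volatile".toList, "unstable market".toList)]

theorem pvT3_ne : pvNE pvT3 := by unfold pvNE pvT3; decide

theorem pvScanB_eq : ∀ (s : List Char), pvScanB s = pvScan pvT3 s := by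
  intro s
  induction hn : s.length using Nat.strong_induction_on generalizing s with
  | _ n ih =>
  cases s with
  | nil => simp [pvScanB, pvScan, pvScanF]
  | cons c t =>
    rw [pvScanB]
    by_cases h1 : ("bullish".toList).isPrefixOf (c :: t) = true
    · rw [if_pos h1, ih (List.drop 7 (c :: t)).length (by simp only [List.length_drop, List.length_cons, ← hn]; omega) _ rfl,
          pvScan_cons_some pvT3 pvT3_ne c t
            ("bullish".toList, "positive market sentiment".toList)
            (by simp only [pvT3, List.find?, h1])]
      rfl
    · rw [if_neg h1]
      simp only [Bool.not_eq_true] at h1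
      by_cases h2 : ("bearish".toList).isPrefixOf (c :: t) = true
      · rw [if_pos h2, ih (List.drop 7 (c :: t)).length (by simp only [List.length_drop, List.length_cons, ← hn]; omega) _ rfl,
            pvScan_cons_some pvT3 pvT3_ne c t
              ("bearish".toList, "negative market sentiment".toList)
              (by simp only [pvT3, List.find?, h1, h2])]
        rfl
      · rw [if_neg h2]
        simp only [Bool.not_eq_true] at h2
        by_cases h3 : ("volatile".toList).isPrefixOf (c :: t) = true
        · rw [if_pos h3, ih (List.drop 8 (c :: t)).length (by simp only [List.length_drop, List.length_cons, ← hn]; omega) _ rfl,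
              pvScan_cons_some pvT3 pvT3_ne c t
                ("volatile".toList, "unstable market".toList)
                (by simp only [pvT3, List.find?, h1, h2, h3])]
          rfl
        · rw [if_neg h3]
          simp only [Bool.not_eq_true] at h3
          rw [ih t.length (by simp [← hn]) t rfl,
              pvScan_cons_none pvT3 pvT3_ne c t
                (by simp only [pvT3, List.find?, h1, h2, h3])]

theorem pvChain (X : List Char) :
    PySem.Chars.replace
      (PySem.Chars.replace
        (PySem.Chars.replace X "bullish".toList "positive market sentiment".toList)
        "bearish".toList "negative market sentiment".toList)
      "volatile".toList "unstable market".toList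
    = pvScanB X := by
  rw [pvReplace_eq _ _ _ (by decide), pvReplace_eq _ _ _ (by decide),
      pvReplace_eq _ _ _ (by decide)]
  rw [pvScan_fuse [("bullish".toList, "positive market sentiment".toList)]
        (by unfold pvNE; decide) "bearish".toList "negative market sentiment".toList
        (by decide) (by unfold pvIncomp; decide)
        (by unfold pvPasses pvIncomp; decide) (by unfold pvPasses pvIncomp; decide)]
  simp only [List.cons_append, List.nil_append]
  rw [pvScan_fuse [("bullish".toList, "positive market sentiment".toList),
        ("bearish".toList, "negative market sentiment".toList)]
        (by unfold pvNE; decide) "volatile".toList "unstable market".toList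
        (by decide) (by unfold pvIncomp; decide)
        (by unfold pvPasses pvIncomp; decide) (by unfold pvPasses pvIncomp; decide)]
  rw [pvScanB_eq]
  rfl

-- ===== VERDICT (by name: the statement is the Claim_ definition above) =====
theorem handle_ambiguity_spec : Claim_equal_handle_ambiguity := by
  unfold Claim_equal_handle_ambiguity
  intro text _
  unfold Spec_handle_ambiguity
  have hA : handle_ambiguity text =
      PySem.Str.replace
        (PySem.Str.replace
          (PySem.Str.replace text "bullish" "positive market sentiment")
          "bearish" "negative market sentiment")
        "volatile" "unstable market" := rfl
  rw [hA]
  apply String.toList_inj.mp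
  simp only [PySem.Str.toList_replace, handle_ambiguity_alt, String.toList_ofList]
  exact pvChain text.toList
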